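-- pv_equiv track=rewrite | github.com/karpovall/tasks_students | mount.py | mount
-- ===== SOURCE A (Python) =====
-- def mount(a: list[int]):
--
--     if not a:
--         return False
--     k, max1 = False, a[0]
--     for i in range(len(a) - 1):
--         if a[i] > a[i+1]:
--             k = True
--         if a[i] < a[i+1] and k:
--             return False
--     if max(a) != a[0] and k:
--         return True
--     return False
-- ===== SOURCE B (Python) =====
-- def mount(a: list[int]):
--     if not a:
--         return False
--     m = max(a)
--     if m == a[0]:
--         return False
--     p = a.index(m)
--     n = len(a)
--     return (all(a[i] <= a[i + 1] for i in range(p))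
--             and all(a[i] >= a[i + 1] for i in range(p, n - 1))
--             and any(a[i] > a[i + 1] for i in range(n - 1)))
-- ===== Notes on version B (the rewrite author's own statement) =====
-- stated objective: alternative
-- what changed: Replaced A's single flag-threaded scan with early return by a find-the-peak decomposition: locate the first maximum, check the prefix is weakly increasing and the suffix weakly decreasing, and that some strict descent exists.
import Mathlib
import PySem

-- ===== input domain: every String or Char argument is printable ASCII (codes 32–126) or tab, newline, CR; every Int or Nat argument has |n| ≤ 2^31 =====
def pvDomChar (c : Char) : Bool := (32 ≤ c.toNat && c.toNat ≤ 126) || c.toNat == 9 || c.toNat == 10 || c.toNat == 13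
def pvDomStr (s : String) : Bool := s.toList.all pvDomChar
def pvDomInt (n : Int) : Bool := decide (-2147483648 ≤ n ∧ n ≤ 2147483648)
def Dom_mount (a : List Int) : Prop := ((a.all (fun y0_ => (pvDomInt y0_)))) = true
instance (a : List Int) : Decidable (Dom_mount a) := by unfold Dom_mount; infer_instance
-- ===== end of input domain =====

-- B replaces A's flag-threaded scan by a find-the-peak decomposition (same O(n) cost, plainer structure).

-- ===== PORT A =====
-- the for-loop over range(len(a)-1) with the early `return False` and flag k
def mountLoopA (a : List Int) : List Nat → Bool → Option Bool
  | [], k => some k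
  | i :: rest, k =>
    let k := if a.getD i 0 > a.getD (i+1) 0 then true else k
    if a.getD i 0 < a.getD (i+1) 0 && k then none
    else mountLoopA a rest k

def mount (a : List Int) : Bool :=
  match a with
  | [] => false
  | a0 :: _ =>
    match mountLoopA a (List.range (a.length - 1)) false with
    | none => false
    | some k =>
      if ((PySem.List.max? a (fun y => y)).getD 0 ≠ a0) && k then true else false

-- ===== PORT B =====
def mount_alt (a : List Int) : Bool :=
  match a with
  | [] => false
  | a0 :: _ =>
    let m := (PySem.List.max? a (fun y => y)).getD 0
    if m = a0 then false
    else
      let p := (PySem.List.index? a m).getD 0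
      let n := a.length
      ((List.range p).all (fun i => a.getD i 0 ≤ a.getD (i+1) 0)) &&
      ((List.range' p (n - 1 - p)).all (fun i => a.getD i 0 ≥ a.getD (i+1) 0)) &&
      ((List.range (n - 1)).any (fun i => a.getD i 0 > a.getD (i+1) 0))

-- ===== PRECONDITION & SPEC =====
def Spec_mount (a : List Int) (out : Bool) : Prop := out = mount_alt a
instance (a : List Int) (out : Bool) : Decidable (Spec_mount a out) := by unfold Spec_mount; infer_instance

-- ===== CLAIM (what is proved, stated in full; the proofs are below) =====
def Claim_equal_mount : Prop := ∀ (a : List Int), Dom_mount a → Spec_mount a (mount a)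

-- ===== LEMMAS AND PROOFS =====

theorem loopA_some (a : List Int) (ns : List Nat) (k : Bool)
    (h : mountLoopA a ns k ≠ none) :
    mountLoopA a ns k = some (k || ns.any (fun i => a.getD i 0 > a.getD (i+1) 0)) := by
  induction ns generalizing k with
  | nil => simp [mountLoopA]
  | cons x rest ih =>
    simp only [mountLoopA] at h ⊢
    by_cases hg : (decide (a.getD x 0 < a.getD (x+1) 0) && (if a.getD x 0 > a.getD (x+1) 0 then true else k)) = true
    · rw [if_pos hg] at h; exact absurd rfl h
    · rw [if_neg (by simpa using hg)] at h ⊢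
      rw [ih _ h]
      simp only [List.any_cons]
      cases k <;> simp

theorem loopA_none_iff (a : List Int) (ns : List Nat) (hs : ns.Pairwise (· < ·)) (k : Bool) :
    mountLoopA a ns k = none ↔
      ∃ j ∈ ns, (a.getD j 0 < a.getD (j+1) 0) ∧
        (k = true ∨ ∃ i ∈ ns, i < j ∧ a.getD i 0 > a.getD (i+1) 0) := by
  induction ns generalizing k with
  | nil => simp [mountLoopA]
  | cons x rest ih =>
    obtain ⟨hx, hrest⟩ := List.pairwise_cons.mp hs
    simp only [mountLoopA]
    by_cases hg : (decide (a.getD x 0 < a.getD (x+1) 0) && (if a.getD x 0 > a.getD (x+1) 0 then true else k)) = true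
    · rw [if_pos hg]
      simp only [Bool.and_eq_true, decide_eq_true_eq] at hg
      obtain ⟨hasc, hk⟩ := hg
      have hnd : ¬ a.getD x 0 > a.getD (x+1) 0 := by omega
      have hk' : k = true := by
        cases k with
        | false => rw [if_neg hnd] at hk; exact hk
        | true => rfl
      constructor
      · intro _; exact ⟨x, by simp, hasc, Or.inl hk'⟩
      · intro _; rfl
    · rw [if_neg (by simpa using hg)]
      rw [ih hrest]
      simp only [Bool.and_eq_true, decide_eq_true_eq, not_and] at hg
      constructor
      · rintro ⟨j, hj, hasc, hcond⟩
        refine ⟨j, List.mem_cons_of_mem _ hj, hasc, ?_⟩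
        rcases hcond with hk | ⟨i, hi, hij, hd⟩
        · by_cases hd : a.getD x 0 > a.getD (x+1) 0
          · exact Or.inr ⟨x, List.mem_cons_self, hx j hj, hd⟩
          · left
            cases k with
            | false => rw [if_neg hd] at hk; exact hk
            | true => rfl
        · exact Or.inr ⟨i, List.mem_cons_of_mem _ hi, hij, hd⟩
      · rintro ⟨j, hj, hasc, hcond⟩
        obtain heq | hj' := List.mem_cons.mp hj
        · -- j = x : the early-exit didn't fire, derive contradiction / impossibility
          subst heq
          exfalso
          rcases hcond with hk | ⟨i, hi, hij, hd⟩
          · have hnd : ¬ a.getD j 0 > a.getD (j+1) 0 := by omega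
            exact hg hasc (by rw [if_neg hnd]; exact hk)
          · obtain heq2 | hi' := List.mem_cons.mp hi
            · subst heq2; omega
            · exact absurd (hx i hi') (by omega)
        · refine ⟨j, hj', hasc, ?_⟩
          rcases hcond with hk | ⟨i, hi, hij, hd⟩
          · left
            by_cases hd : a.getD x 0 > a.getD (x+1) 0
            · rw [if_pos hd]
            · rw [if_neg hd]; exact hk
          · obtain heq2 | hi' := List.mem_cons.mp hi
            · subst heq2; left; rw [if_pos hd]
            · exact Or.inr ⟨i, hi', hij, hd⟩

theorem chain_down (a : List Int) (s : Nat) : ∀ t, s ≤ t →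
    (∀ j, s ≤ j → j < t → ¬ a.getD j 0 < a.getD (j+1) 0) → a.getD t 0 ≤ a.getD s 0 := by
  intro t
  induction t with
  | zero => intro h _; interval_cases s; exact le_refl _
  | succ t ih =>
    intro hst hmono
    rcases Nat.lt_or_ge s (t+1) with h | h
    · have h1 : a.getD t 0 ≤ a.getD s 0 := ih (by omega) (fun j h1 h2 => hmono j h1 (by omega))
      have h2 : ¬ a.getD t 0 < a.getD (t+1) 0 := hmono t (by omega) (by omega)
      omega
    · have : s = t+1 := by omega
      subst this; exact le_refl _

theorem chain_up (a : List Int) (s : Nat) : ∀ t, s ≤ t →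
    (∀ j, s ≤ j → j < t → ¬ a.getD j 0 > a.getD (j+1) 0) → a.getD s 0 ≤ a.getD t 0 := by
  intro t
  induction t with
  | zero => intro h _; interval_cases s; exact le_refl _
  | succ t ih =>
    intro hst hmono
    rcases Nat.lt_or_ge s (t+1) with h | h
    · have h1 : a.getD s 0 ≤ a.getD t 0 := ih (by omega) (fun j h1 h2 => hmono j h1 (by omega))
      have h2 : ¬ a.getD t 0 > a.getD (t+1) 0 := hmono t (by omega) (by omega)
      omega
    · have : s = t+1 := by omega
      subst this; exact le_refl _

theorem bad_iff (a : List Int) (m : Int) (p : Nat) (hpn : p < a.length)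
    (hap : a.getD p 0 = m) (hmx : ∀ i, i < a.length → a.getD i 0 ≤ m) :
    (∃ j, j < a.length - 1 ∧ a.getD j 0 < a.getD (j+1) 0 ∧
        ∃ i, i < j ∧ a.getD i 0 > a.getD (i+1) 0)
      ↔ ¬((∀ i, i < p → a.getD i 0 ≤ a.getD (i+1) 0) ∧
          (∀ i, p ≤ i → i < a.length - 1 → a.getD (i+1) 0 ≤ a.getD i 0)) := by
  constructor
  · rintro ⟨j, hj, hasc, i, hij, hdesc⟩ ⟨hP1, hP2⟩
    have hjp : j < p := by
      by_contra h
      have := hP2 j (by omega) hj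
      omega
    have := hP1 i (by omega)
    omega
  · intro hnot
    rcases not_and_or.mp hnot with h | h
    · push_neg at h
      obtain ⟨i, hip, hdesc⟩ := h
      have hasc : ∃ j, i < j ∧ j < p ∧ a.getD j 0 < a.getD (j+1) 0 := by
        by_contra hno
        push_neg at hno
        have hchain : a.getD p 0 ≤ a.getD (i+1) 0 :=
          chain_down a (i+1) p (by omega) (fun j h1 h2 => (by have := hno j (by omega) (by omega); omega : ¬ a.getD j 0 < a.getD (j+1) 0))
        have := hmx i (by omega)
        omega
      obtain ⟨j, hij, hjp, hasc⟩ := hasc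
      exact ⟨j, by omega, hasc, i, hij, by omega⟩
    · push_neg at h
      obtain ⟨i, hpi, hin, hasc⟩ := h
      have hdesc : ∃ j, p ≤ j ∧ j < i ∧ a.getD j 0 > a.getD (j+1) 0 := by
        by_contra hno
        push_neg at hno
        have hchain : a.getD p 0 ≤ a.getD i 0 :=
          chain_up a p i hpi (fun j h1 h2 => (by have := hno j h1 h2; omega : ¬ a.getD j 0 > a.getD (j+1) 0))
        have := hmx (i+1) (by omega)
        omega
      obtain ⟨j, hpj, hji, hdesc⟩ := hdesc
      exact ⟨i, hin, by omega, j, hji, hdesc⟩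

theorem allP1_iff (a : List Int) (p : Nat) :
    ((List.range p).all (fun i => decide (a.getD i 0 ≤ a.getD (i+1) 0)) = true) ↔
      (∀ i, i < p → a.getD i 0 ≤ a.getD (i+1) 0) := by
  rw [List.all_eq_true]
  constructor
  · intro h i hi
    have := h i (List.mem_range.mpr hi)
    simpa using this
  · intro h i hi
    simpa using h i (List.mem_range.mp hi)

theorem allP2_iff (a : List Int) (p len : Nat) :
    ((List.range' p len).all (fun i => decide (a.getD i 0 ≥ a.getD (i+1) 0)) = true) ↔
      (∀ i, p ≤ i → i < p + len → a.getD (i+1) 0 ≤ a.getD i 0) := by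
  rw [List.all_eq_true]
  constructor
  · intro h i h1 h2
    have := h i (List.mem_range'_1.mpr ⟨h1, h2⟩)
    simpa using this
  · intro h i hi
    obtain ⟨h1, h2⟩ := List.mem_range'_1.mp hi
    simpa using h i h1 h2

-- ===== VERDICT (by name: the statement is the Claim_ definition above) =====
theorem mount_spec : Claim_equal_mount := by
  unfold Claim_equal_mount
  intro a _
  unfold Spec_mount
  cases a with
  | nil => rfl
  | cons a0 t =>
    obtain ⟨m, hm⟩ : ∃ m, PySem.List.max? (a0 :: t) (fun y => y) = some m := by
      cases hmx : PySem.List.max? (a0 :: t) (fun y => y) with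
      | none => exact absurd ((PySem.List.max?_eq_none_iff (xs := a0 :: t) (key := fun y => y)).mp hmx) (by simp)
      | some m => exact ⟨m, rfl⟩
    have hmem : m ∈ (a0 :: t) := PySem.List.max?_mem hm
    have hmax : ∀ y ∈ (a0 :: t), y ≤ m := fun y hy => PySem.List.max?_isMax hm y hy
    obtain ⟨p, hp⟩ : ∃ p, PySem.List.index? (a0 :: t) m = some p := by
      have h1 : (PySem.List.index? (a0 :: t) m).isSome := (PySem.List.index?_isSome_iff (xs := a0 :: t) (v := m)).mpr hmem
      exact Option.isSome_iff_exists.mp h1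
    obtain ⟨hpn, hap, -⟩ := PySem.List.getElem_of_index?_eq_some hp
    have hapd : (a0 :: t).getD p 0 = m := by
      rw [List.getD_eq_getElem _ _ hpn]; exact hap
    have hmaxd : ∀ i, i < (a0 :: t).length → (a0 :: t).getD i 0 ≤ m := fun i hi => by
      rw [List.getD_eq_getElem _ _ hi]; exact hmax _ (List.getElem_mem hi)
    have hrange_pw : (List.range ((a0 :: t).length - 1)).Pairwise (· < ·) :=
      List.pairwise_lt_range
    by_cases hbad : ∃ j, j < (a0 :: t).length - 1 ∧ (a0 :: t).getD j 0 < (a0 :: t).getD (j+1) 0 ∧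
        ∃ i, i < j ∧ (a0 :: t).getD i 0 > (a0 :: t).getD (i+1) 0
    · -- the early `return False` fires in A
      have hnone : mountLoopA (a0 :: t) (List.range ((a0 :: t).length - 1)) false = none := by
        rw [loopA_none_iff _ _ hrange_pw]
        obtain ⟨j, hj, hasc, i, hij, hd⟩ := hbad
        exact ⟨j, List.mem_range.mpr hj, hasc,
          Or.inr ⟨i, List.mem_range.mpr (by omega), hij, hd⟩⟩
      have hnp := (bad_iff (a0 :: t) m p hpn hapd hmaxd).mp hbad
      simp only [mount, mount_alt, hnone, hm, hp, Option.getD_some]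
      by_cases hma : m = a0
      · rw [if_pos hma]
      · rw [if_neg hma]
        cases h1 : ((List.range p).all
            (fun i => decide ((a0 :: t).getD i 0 ≤ (a0 :: t).getD (i+1) 0))) with
        | false => simp
        | true =>
          cases h2 : ((List.range' p ((a0 :: t).length - 1 - p)).all
              (fun i => decide ((a0 :: t).getD i 0 ≥ (a0 :: t).getD (i+1) 0))) with
          | false => simp
          | true =>
            exfalso
            refine hnp ⟨(allP1_iff _ _).mp h1, fun i hpi hin => ?_⟩
            exact (allP2_iff _ _ _).mp h2 i hpi (by omega)
    · -- A's loop runs to completion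
      have hne : mountLoopA (a0 :: t) (List.range ((a0 :: t).length - 1)) false ≠ none := by
        intro hcontra
        rw [loopA_none_iff _ _ hrange_pw] at hcontra
        obtain ⟨j, hjmem, hasc, hcond⟩ := hcontra
        rcases hcond with hfk | ⟨i, himem, hij, hd⟩
        · exact absurd hfk (by simp)
        · exact hbad ⟨j, List.mem_range.mp hjmem, hasc, i, hij, hd⟩
      have hP12 : (∀ i, i < p → (a0 :: t).getD i 0 ≤ (a0 :: t).getD (i+1) 0) ∧
          (∀ i, p ≤ i → i < (a0 :: t).length - 1 → (a0 :: t).getD (i+1) 0 ≤ (a0 :: t).getD i 0) := by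
        by_contra h
        exact hbad ((bad_iff (a0 :: t) m p hpn hapd hmaxd).mpr h)
      simp only [mount, mount_alt, loopA_some _ _ _ hne, hm, hp, Option.getD_some,
        Bool.false_or]
      by_cases hma : m = a0
      · rw [if_pos hma]
        have hcond : (decide ¬(m = a0) && (List.range ((a0 :: t).length - 1)).any
            (fun i => decide ((a0 :: t).getD i 0 > (a0 :: t).getD (i+1) 0))) = false := by
          simp [hma]
        rw [hcond]
        rfl
      · rw [if_neg hma]
        have h1 : ((List.range p).all
            (fun i => decide ((a0 :: t).getD i 0 ≤ (a0 :: t).getD (i+1) 0))) = true :=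
          (allP1_iff _ _).mpr hP12.1
        have h2 : ((List.range' p ((a0 :: t).length - 1 - p)).all
            (fun i => decide ((a0 :: t).getD i 0 ≥ (a0 :: t).getD (i+1) 0))) = true :=
          (allP2_iff _ _ _).mpr (fun i hpi hin => hP12.2 i hpi (by omega))
        have hd : (decide ¬(m = a0)) = true := decide_eq_true hma
        rw [h1, h2, hd]
        cases hany : ((List.range ((a0 :: t).length - 1)).any
            (fun i => decide ((a0 :: t).getD i 0 > (a0 :: t).getD (i+1) 0))) <;> simp
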